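-- pv_equiv track=rewrite | github.com/ManeetSigtia/estimating-state-space-diameters | src/algorithms/diameter.py | _greedy_dominating_set
-- ===== SOURCE A (Python) =====
-- from typing import Dict, Set, List, Tuple
--
-- def _greedy_dominating_set(universe: List, subsets: Dict) -> Set:
--     """
--     Approximates the Dominating Set problem via Greedy Set Cover.
--     """
--     uncovered = set(universe)
--     dominating_set = set()
--
--     # Optimization: subsets are PBFS_s(v).
--     # We need to pick 'v' (key) such that PBFS_s(v) (value) covers the most uncovered.
--
--     # While the universe is not fully covered
--     while uncovered:
--         best_v = None
--         best_cover_count = -1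
--
--         # This search is O(N^2) in worst case, acceptable for the algorithm's constraints
--         for v in subsets:
--             if v in dominating_set:
--                 continue
--
--             # Count intersection size
--             # (Intersection of this node's partial neighborhood with remaining uncovered nodes)
--             count = 0
--             for u in subsets[v]:
--                 if u in uncovered:
--                     count += 1
--
--             if count > best_cover_count:
--                 best_cover_count = count
--                 best_v = v
--
--         if best_v is None or best_cover_count == 0:
--             # Should not happen in connected components if pbfs_sets includes self
--             break
--
--         dominating_set.add(best_v)
--         # Remove covered elements
--         for u in subsets[best_v]:
--             if u in uncovered:
--                 uncovered.remove(u)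
--
--     return dominating_set
-- ===== SOURCE B (Python) =====
-- def _greedy_dominating_set(universe, subsets):
--     """Greedy set cover with an inverted index and incrementally maintained
--     cover counts: counts are decremented when an element is covered instead of
--     being recomputed by rescanning every subset each round."""
--     uncovered = set(universe)
--     counts = {}
--     inv = {}
--     for v, elems in subsets.items():
--         c = 0
--         for u in elems:
--             if u in uncovered:
--                 c += 1
--                 inv.setdefault(u, []).append(v)
--         counts[v] = c
--     dominating_set = set()
--     while uncovered:
--         best_v = None
--         best_cover_count = -1
--         for v, c in counts.items():
--             if c > best_cover_count:
--                 best_cover_count = c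
--                 best_v = v
--         if best_v is None or best_cover_count == 0:
--             break
--         dominating_set.add(best_v)
--         for u in subsets[best_v]:
--             if u in uncovered:
--                 uncovered.remove(u)
--                 for w in inv[u]:
--                     counts[w] -= 1
--     return dominating_set
-- ===== Notes on version B (the rewrite author's own statement) =====
-- stated objective: faster
-- what changed: Replaces A's per-round rescan of every subset (recounting each subset's intersection with the uncovered set every iteration) with a precomputed inverted index element->subsets and incrementally maintained cover counts that are decremented exactly when an element becomes covered.
import Mathlib
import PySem

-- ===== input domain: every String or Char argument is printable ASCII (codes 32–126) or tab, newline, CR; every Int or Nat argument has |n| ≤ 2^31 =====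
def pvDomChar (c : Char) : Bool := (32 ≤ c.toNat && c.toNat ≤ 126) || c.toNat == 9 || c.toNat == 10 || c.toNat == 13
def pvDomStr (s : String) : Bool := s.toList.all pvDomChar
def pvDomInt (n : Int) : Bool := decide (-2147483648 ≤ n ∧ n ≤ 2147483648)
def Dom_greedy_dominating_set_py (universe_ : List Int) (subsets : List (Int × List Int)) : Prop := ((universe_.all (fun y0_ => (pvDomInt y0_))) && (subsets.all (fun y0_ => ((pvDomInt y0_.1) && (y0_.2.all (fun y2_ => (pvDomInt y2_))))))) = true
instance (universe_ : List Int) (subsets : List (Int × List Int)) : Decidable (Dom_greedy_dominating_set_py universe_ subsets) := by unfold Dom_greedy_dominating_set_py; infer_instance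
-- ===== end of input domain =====

-- B replaces A's per-round rescan of every subset with a precomputed inverted index and
-- incrementally decremented cover counts (same selections, same returned set).

-- ===== PORT A =====
-- inner counting loop: 'count = 0; for u in subsets[v]: if u in uncovered: count += 1'
def pvCountIn (unc : PySem.Set Int) (es : List Int) : Int :=
  es.foldl (fun c u => if PySem.Set.contains unc u then c + 1 else c) 0

-- 'for v in subsets: if v in dominating_set: continue; …' selecting (best_v, best_cover_count)
def pvScanA (d : PySem.Dict Int (List Int)) (dom unc : PySem.Set Int) : Option Int × Int :=
  d.keys.foldl (fun st v =>
      if PySem.Set.contains dom v then st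
      else if pvCountIn unc (d.getD v []) > st.2 then (some v, pvCountIn unc (d.getD v [])) else st)
    (none, -1)

-- 'for u in subsets[best_v]: if u in uncovered: uncovered.remove(u)' (guarded remove = discard)
def pvRemoveCovered (unc : PySem.Set Int) (es : List Int) : PySem.Set Int :=
  es.foldl (fun s u => if PySem.Set.contains s u then PySem.Set.discard s u else s) unc

-- 'while uncovered: …'; each productive iteration adds a fresh key, so |keys|+1 fuel suffices
def pvLoopA (d : PySem.Dict Int (List Int)) : Nat → PySem.Set Int → PySem.Set Int → List Int
  | 0, _, dom => dom
  | fuel + 1, unc, dom =>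
    if unc = [] then dom
    else
      let st := pvScanA d dom unc
      match st.1 with
      | none => dom
      | some bv =>
        if st.2 == 0 then dom
        else pvLoopA d fuel (pvRemoveCovered unc (d.getD bv [])) (PySem.Set.add dom bv)

def greedy_dominating_set_py (universe_ : List Int) (subsets : List (Int × List Int)) : List Int :=
  let d := PySem.Dict.ofList subsets
  pvLoopA d (subsets.length + 1) (PySem.Set.ofList universe_) PySem.Set.empty

-- ===== PORT B =====
-- 'for u in elems: if u in uncovered: c += 1; inv.setdefault(u, []).append(v)'
def pvInnerStep (unc0 : PySem.Set Int) (v : Int) (q : Int × PySem.Dict Int (List Int)) (u : Int) :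
    Int × PySem.Dict Int (List Int) :=
  if PySem.Set.contains unc0 u then (q.1 + 1, q.2.modify u [] (· ++ [v])) else q

-- 'for v, elems in subsets.items(): …; counts[v] = c'
def pvInitStep (unc0 : PySem.Set Int)
    (st : PySem.Dict Int Int × PySem.Dict Int (List Int)) (p : Int × List Int) :
    PySem.Dict Int Int × PySem.Dict Int (List Int) :=
  let r := p.2.foldl (pvInnerStep unc0 p.1) ((0 : Int), st.2)
  (st.1.insert p.1 r.1, r.2)

def pvInitB (unc0 : PySem.Set Int) (items : List (Int × List Int)) :
    PySem.Dict Int Int × PySem.Dict Int (List Int) :=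
  items.foldl (pvInitStep unc0) (PySem.Dict.empty, PySem.Dict.empty)

-- 'for v, c in counts.items(): if c > best_cover_count: …'
def pvScanB (counts : PySem.Dict Int Int) : Option Int × Int :=
  counts.items.foldl (fun st p => if p.2 > st.2 then (some p.1, p.2) else st) (none, -1)

-- 'for u in subsets[best_v]: if u in uncovered: uncovered.remove(u); for w in inv[u]: counts[w] -= 1'
def pvCoverB (inv : PySem.Dict Int (List Int)) (es : List Int)
    (unc : PySem.Set Int) (counts : PySem.Dict Int Int) :
    PySem.Set Int × PySem.Dict Int Int :=
  es.foldl (fun st u =>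
      if PySem.Set.contains st.1 u then
        (PySem.Set.discard st.1 u,
         (inv.getD u []).foldl (fun cs w => cs.modify w 0 (fun c => c - 1)) st.2)
      else st)
    (unc, counts)

def pvLoopB (d inv : PySem.Dict Int (List Int)) :
    Nat → PySem.Set Int → PySem.Set Int → PySem.Dict Int Int → List Int
  | 0, _, dom, _ => dom
  | fuel + 1, unc, dom, counts =>
    if unc = [] then dom
    else
      let st := pvScanB counts
      match st.1 with
      | none => dom
      | some bv =>
        if st.2 == 0 then dom
        else
          let r := pvCoverB inv (d.getD bv []) unc counts
          pvLoopB d inv fuel r.1 (PySem.Set.add dom bv) r.2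

def greedy_dominating_set_py_alt (universe_ : List Int) (subsets : List (Int × List Int)) : List Int :=
  let d := PySem.Dict.ofList subsets
  let unc0 := PySem.Set.ofList universe_
  let ci := pvInitB unc0 d.items
  pvLoopB d ci.2 (subsets.length + 1) unc0 PySem.Set.empty ci.1

-- ===== PRECONDITION & SPEC =====
def Spec_greedy_dominating_set_py (universe_ : List Int) (subsets : List (Int × List Int)) (out : List Int) : Prop := out = greedy_dominating_set_py_alt universe_ subsets
instance (universe_ : List Int) (subsets : List (Int × List Int)) (out : List Int) : Decidable (Spec_greedy_dominating_set_py universe_ subsets out) := by unfold Spec_greedy_dominating_set_py; infer_instance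

-- ===== CLAIM (what is proved, stated in full; the proofs are below) =====
def Claim_equal_greedy_dominating_set_py : Prop := ∀ (universe_ : List Int) (subsets : List (Int × List Int)), Dom_greedy_dominating_set_py universe_ subsets → Spec_greedy_dominating_set_py universe_ subsets (greedy_dominating_set_py universe_ subsets)

-- ===== LEMMAS AND PROOFS =====

-- counting as countP
theorem pvCountIn_eq_countP (unc : PySem.Set Int) (es : List Int) :
    pvCountIn unc es = ((es.countP (fun x => decide (x ∈ unc)) : Nat) : Int) := by
  unfold pvCountIn
  rw [PySem.List.foldl_count_if (fun x => PySem.Set.contains unc x) es 0]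
  have h : es.countP (fun x => PySem.Set.contains unc x)
      = es.countP (fun x => decide (x ∈ unc)) :=
    List.countP_congr (fun a _ => by simp [PySem.Set.contains_iff])
  rw [h]
  simp

theorem pvCountIn_nonneg (unc : PySem.Set Int) (es : List Int) : 0 ≤ pvCountIn unc es := by
  rw [pvCountIn_eq_countP]; positivity

theorem countP_discard (unc : PySem.Set Int) (u : Int) (hu : u ∈ unc) (es : List Int) :
    es.countP (fun x => decide (x ∈ PySem.Set.discard unc u)) + es.count u
      = es.countP (fun x => decide (x ∈ unc)) := by
  induction es with
  | nil => simp
  | cons x t ih =>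
    by_cases hxu : x = u
    · have h1 : decide (x ∈ PySem.Set.discard unc u) = false := by
        subst hxu; simp [PySem.Set.mem_discard]
      have h2 : decide (x ∈ unc) = true := by subst hxu; simpa using hu
      have h3 : (x == u) = true := by simp [hxu]
      simp only [List.countP_cons, List.count_cons, h1, h2, h3, if_true]
      simp only [Bool.false_eq_true, if_false]
      omega
    · have h3 : (x == u) = false := by simp [hxu]
      by_cases hxm : x ∈ unc
      · have h1 : decide (x ∈ PySem.Set.discard unc u) = true := by
          simp [PySem.Set.mem_discard, hxm, hxu]
        have h2 : decide (x ∈ unc) = true := by simpa using hxm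
        simp only [List.countP_cons, List.count_cons, h1, h2, h3, if_true]
        simp only [Bool.false_eq_true, if_false]
        omega
      · have h1 : decide (x ∈ PySem.Set.discard unc u) = false := by
          simp [PySem.Set.mem_discard, hxm]
        have h2 : decide (x ∈ unc) = false := by simpa using hxm
        simp only [List.countP_cons, List.count_cons, h1, h2, h3]
        simp only [Bool.false_eq_true, if_false]
        omega

theorem pvCountIn_discard (unc : PySem.Set Int) (u : Int) (hu : u ∈ unc) (es : List Int) :
    pvCountIn (PySem.Set.discard unc u) es = pvCountIn unc es - (es.count u : Int) := by
  have h := countP_discard unc u hu es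
  rw [pvCountIn_eq_countP, pvCountIn_eq_countP]
  omega

theorem pvCountIn_zero_mono (unc unc' : PySem.Set Int) (es : List Int)
    (hsub : ∀ x ∈ unc', x ∈ unc) (h0 : pvCountIn unc es = 0) : pvCountIn unc' es = 0 := by
  rw [pvCountIn_eq_countP] at *
  have h0' : es.countP (fun x => decide (x ∈ unc)) = 0 := by omega
  rw [List.countP_eq_zero] at h0'
  have h1 : es.countP (fun x => decide (x ∈ unc')) = 0 := by
    rw [List.countP_eq_zero]
    intro a ha hc
    exact h0' a ha (by simpa using hsub a (by simpa using hc))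
  omega

theorem mem_pvRemoveCovered (es : List Int) :
    ∀ (unc : PySem.Set Int) (x : Int), x ∈ pvRemoveCovered unc es ↔ x ∈ unc ∧ x ∉ es := by
  induction es with
  | nil => simp [pvRemoveCovered]
  | cons e t ih =>
    intro unc x
    show x ∈ pvRemoveCovered (if PySem.Set.contains unc e then PySem.Set.discard unc e else unc) t ↔ _
    by_cases he : e ∈ unc
    · rw [if_pos ((PySem.Set.contains_iff _ _).2 he), ih]
      simp only [PySem.Set.mem_discard, List.mem_cons]
      constructor
      · rintro ⟨⟨h1, h2⟩, h3⟩
        exact ⟨h1, by rintro (rfl | h); exacts [h2 rfl, h3 h]⟩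
      · rintro ⟨h1, h2⟩
        exact ⟨⟨h1, fun hx => h2 (Or.inl hx)⟩, fun h => h2 (Or.inr h)⟩
    · rw [if_neg (by simp [PySem.Set.contains_iff, he]), ih]
      simp only [List.mem_cons]
      constructor
      · rintro ⟨h1, h2⟩
        exact ⟨h1, by rintro (rfl | h); exacts [he h1, h2 h]⟩
      · rintro ⟨h1, h2⟩
        exact ⟨h1, fun h => h2 (Or.inr h)⟩

theorem pvCountIn_removeCovered (unc : PySem.Set Int) (es : List Int) :
    pvCountIn (pvRemoveCovered unc es) es = 0 := by
  rw [pvCountIn_eq_countP]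
  have h1 : es.countP (fun x => decide (x ∈ pvRemoveCovered unc es)) = 0 := by
    rw [List.countP_eq_zero]
    intro a ha hc
    exact ((mem_pvRemoveCovered es unc a).1 (by simpa using hc)).2 ha
  omega

-- keys of a dict are the first components of its items
theorem pvKeys_def (d : PySem.Dict Int (List Int)) : d.keys = d.items.map Prod.fst := rfl

theorem pvExists_es (d : PySem.Dict Int (List Int)) (hnd : d.keys.Nodup) {k : Int}
    (hk : k ∈ d.keys) : (k, d.getD k []) ∈ d.items := by
  rw [pvKeys_def] at hk
  obtain ⟨⟨k', es⟩, hp, hfst⟩ := List.mem_map.1 hk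
  simp only at hfst
  subst hfst
  have hg : d.get? k' = some es := PySem.Dict.get?_of_mem_items d hp hnd
  have hgd : d.getD k' [] = es := PySem.Dict.getD_of_get?_eq_some d [] hg
  rw [hgd]; exact hp

-- the inverted index B builds, characterised per element
def invL (d : PySem.Dict Int (List Int)) (u : Int) : List Int :=
  d.items.flatMap (fun p => List.replicate (p.2.count u) p.1)

theorem mem_invL (d : PySem.Dict Int (List Int)) (u w : Int) (h : w ∈ invL d u) : w ∈ d.keys := by
  unfold invL at h
  obtain ⟨p, hp, hw⟩ := List.mem_flatMap.1 h
  rw [List.eq_of_mem_replicate hw, pvKeys_def]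
  exact List.mem_map.2 ⟨p, hp, rfl⟩

theorem count_flat_out (u w : Int) (l : List (Int × List Int)) (h : w ∉ l.map Prod.fst) :
    (l.flatMap (fun p => List.replicate (p.2.count u) p.1)).count w = 0 := by
  induction l with
  | nil => simp
  | cons p t ih =>
    simp only [List.flatMap_cons, List.count_append]
    have h1 : w ≠ p.1 := fun he => h (by simp [he])
    have h2 : w ∉ t.map Prod.fst := fun he => h (by simp [he])
    rw [ih h2, List.count_replicate]
    simp [Ne.symm h1]

theorem count_flat_in (u : Int) (l : List (Int × List Int)) (hnd : (l.map Prod.fst).Nodup)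
    (k : Int) (es : List Int) (h : (k, es) ∈ l) :
    (l.flatMap (fun p => List.replicate (p.2.count u) p.1)).count k = es.count u := by
  induction l with
  | nil => simp at h
  | cons p t ih =>
    simp only [List.map_cons, List.nodup_cons] at hnd
    simp only [List.flatMap_cons, List.count_append]
    rcases List.mem_cons.1 h with rfl | ht
    · rw [count_flat_out u k t hnd.1, List.count_replicate]
      simp
    · have h1 : k ≠ p.1 := by
        intro he; exact hnd.1 (he ▸ List.mem_map.2 ⟨(k, es), ht, rfl⟩)
      rw [ih hnd.2 ht, List.count_replicate]
      simp [Ne.symm h1]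

theorem count_invL (d : PySem.Dict Int (List Int)) (hnd : d.keys.Nodup) (u k : Int)
    (hk : k ∈ d.keys) : (invL d u).count k = (d.getD k []).count u := by
  exact count_flat_in u d.items (by rw [← pvKeys_def]; exact hnd) k (d.getD k []) (pvExists_es d hnd hk)

-- decrement loop
theorem dec_getD (ws : List Int) :
    ∀ (cs : PySem.Dict Int Int) (k : Int),
      (ws.foldl (fun cs w => cs.modify w 0 (fun c => c - 1)) cs).getD k 0
        = cs.getD k 0 - (ws.count k : Int) := by
  induction ws with
  | nil => intro cs k; simp
  | cons w t ih =>
    intro cs k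
    simp only [List.foldl_cons, List.count_cons]
    rw [ih, PySem.Dict.getD_modify]
    by_cases hk : k = w
    · simp only [hk, if_true, beq_self_eq_true, if_pos rfl]
      push_cast; ring
    · simp only [if_neg hk, beq_iff_eq, if_neg (Ne.symm hk)]
      simp [Ne.symm hk]

theorem set_update_self (s : PySem.Set Int) (xs : List Int) (h : ∀ x ∈ xs, x ∈ s) :
    PySem.Set.update s xs = s := by
  rw [PySem.Set.update_eq_append_filter]
  have : (PySem.Set.ofList xs).filter (fun y => !PySem.Set.contains s y) = [] := by
    rw [List.filter_eq_nil_iff]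
    intro a ha
    have : a ∈ s := h a ((PySem.Set.mem_ofList _ _).1 ha)
    simp [PySem.Set.contains_iff, this]
  rw [this, List.append_nil]

theorem dec_keys (ws : List Int) (cs : PySem.Dict Int Int) (h : ∀ w ∈ ws, w ∈ cs.keys) :
    (ws.foldl (fun cs w => cs.modify w 0 (fun c => c - 1)) cs).keys = cs.keys := by
  rw [PySem.Dict.keys_foldl_modify ws 0 (fun _ _ => (fun c => c - 1)) cs]
  exact set_update_self _ _ h

-- init loop lemmas
theorem inner_fst (unc0 : PySem.Set Int) (v : Int) (es : List Int) :
    ∀ (q : Int × PySem.Dict Int (List Int)),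
      (es.foldl (pvInnerStep unc0 v) q).1 = q.1 + pvCountIn unc0 es := by
  induction es with
  | nil => intro q; simp [pvCountIn]
  | cons x t ih =>
    intro q
    have hc : pvCountIn unc0 (x :: t)
        = (if PySem.Set.contains unc0 x then 1 else 0) + pvCountIn unc0 t := by
      simp only [pvCountIn, List.foldl_cons]
      rw [PySem.List.foldl_count_if, PySem.List.foldl_count_if]
      by_cases h : PySem.Set.contains unc0 x <;> simp [h]
    simp only [List.foldl_cons, pvInnerStep]
    by_cases h : PySem.Set.contains unc0 x
    · rw [if_pos h, ih, hc, if_pos h]; ring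
    · rw [if_neg h, ih, hc, if_neg h]; ring

theorem inner_snd (unc0 : PySem.Set Int) (v : Int) (es : List Int) :
    ∀ (q : Int × PySem.Dict Int (List Int)) (u : Int),
      (es.foldl (pvInnerStep unc0 v) q).2.getD u []
        = q.2.getD u [] ++ (if u ∈ unc0 then List.replicate (es.count u) v else []) := by
  induction es with
  | nil => intro q u; simp
  | cons x t ih =>
    intro q u
    simp only [List.foldl_cons, pvInnerStep]
    by_cases h : PySem.Set.contains unc0 x
    · rw [if_pos h, ih]
      rw [PySem.Dict.getD_modify]
      by_cases hux : u = x
      · subst hux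
        have hu0 : u ∈ unc0 := (PySem.Set.contains_iff _ _).1 h
        rw [if_pos rfl, if_pos hu0, if_pos hu0, List.count_cons_self, List.replicate_succ,
          List.append_assoc, List.singleton_append]
      · have hbe : (x == u) = false := by simp [Ne.symm hux]
        rw [if_neg hux]
        simp only [List.count_cons, hbe, if_false, Bool.false_eq_true, Nat.add_zero]
    · rw [if_neg h, ih]
      by_cases hu0 : u ∈ unc0
      · rw [if_pos hu0, if_pos hu0]
        by_cases hux : u = x
        · subst hux
          exact absurd ((PySem.Set.contains_iff _ _).2 hu0) (by simpa using h)
        · have hbe : (x == u) = false := by simp [Ne.symm hux]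
          simp only [List.count_cons, hbe, if_false, Bool.false_eq_true, Nat.add_zero]
      · rw [if_neg hu0, if_neg hu0]

theorem init_snd (unc0 : PySem.Set Int) (l : List (Int × List Int)) :
    ∀ (st0 : PySem.Dict Int Int × PySem.Dict Int (List Int)) (u : Int),
      ((l.foldl (pvInitStep unc0) st0).2).getD u []
        = st0.2.getD u []
          ++ (if u ∈ unc0 then l.flatMap (fun p => List.replicate (p.2.count u) p.1) else []) := by
  induction l with
  | nil => intro st0 u; simp
  | cons p t ih =>
    intro st0 u
    simp only [List.foldl_cons, List.flatMap_cons]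
    rw [ih]
    show (pvInitStep unc0 st0 p).2.getD u [] ++ _ = _
    simp only [pvInitStep]
    rw [inner_snd]
    by_cases hu0 : u ∈ unc0
    · simp only [if_pos hu0, List.append_assoc]
    · simp [if_neg hu0]

theorem init_get?_stable (unc0 : PySem.Set Int) (l : List (Int × List Int)) :
    ∀ (st0 : PySem.Dict Int Int × PySem.Dict Int (List Int)) (k : Int), k ∉ l.map Prod.fst →
      ((l.foldl (pvInitStep unc0) st0).1).get? k = st0.1.get? k := by
  induction l with
  | nil => intro st0 k _; rfl
  | cons p t ih =>
    intro st0 k hk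
    have h1 : k ∉ t.map Prod.fst := fun h => hk (by simp [h])
    have h2 : k ≠ p.1 := fun h => hk (by simp [h])
    simp only [List.foldl_cons]
    rw [ih _ _ h1]
    exact PySem.Dict.get?_insert_of_ne _ _ h2

theorem init_fst (unc0 : PySem.Set Int) (l : List (Int × List Int)) :
    ∀ (st0 : PySem.Dict Int Int × PySem.Dict Int (List Int)), (l.map Prod.fst).Nodup →
      ∀ (k : Int) (es : List Int), (k, es) ∈ l →
        ((l.foldl (pvInitStep unc0) st0).1).getD k 0 = pvCountIn unc0 es := by
  induction l with
  | nil => intro _ _ k es h; simp at h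
  | cons p t ih =>
    intro st0 hnd k es h
    simp only [List.map_cons, List.nodup_cons] at hnd
    simp only [List.foldl_cons]
    rcases List.mem_cons.1 h with rfl | ht
    · rw [PySem.Dict.getD_eq_get?_getD, init_get?_stable unc0 t _ _ hnd.1]
      simp only [pvInitStep]
      rw [PySem.Dict.get?_insert_self]
      simp only [Option.getD_some]
      rw [inner_fst]
      ring
    · exact ih _ hnd.2 k es ht

theorem init_keys (unc0 : PySem.Set Int) (l : List (Int × List Int)) :
    ∀ (st0 : PySem.Dict Int Int × PySem.Dict Int (List Int)),
      ((l.foldl (pvInitStep unc0) st0).1).keys = PySem.Set.update st0.1.keys (l.map Prod.fst) := by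
  induction l with
  | nil => intro st0; simp [PySem.Set.update]
  | cons p t ih =>
    intro st0
    simp only [List.foldl_cons, List.map_cons]
    rw [ih, PySem.Set.update_cons]
    congr 1
    show ((pvInitStep unc0 st0 p).1).keys = _
    simp only [pvInitStep]
    by_cases hc : st0.1.contains p.1
    · rw [PySem.Dict.keys_insert_of_contains _ _ hc]
      have : p.1 ∈ st0.1.keys := (PySem.Dict.contains_iff_mem_keys _ _).1 hc
      unfold PySem.Set.add
      rw [if_pos ((PySem.Set.contains_iff _ _).2 this)]
    · rw [PySem.Dict.keys_insert_of_not_contains _ _ (by simpa using hc)]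
      have : p.1 ∉ st0.1.keys := fun h => hc ((PySem.Dict.contains_iff_mem_keys _ _).2 h)
      unfold PySem.Set.add
      rw [if_neg (by simp [PySem.Set.contains_iff, this])]

-- scan comparison
def pvStep (g : Int → Int) (st : Option Int × Int) (v : Int) : Option Int × Int :=
  if g v > st.2 then (some v, g v) else st

def pvStepA (dom : PySem.Set Int) (g : Int → Int) (st : Option Int × Int) (v : Int) :
    Option Int × Int :=
  if PySem.Set.contains dom v then st else pvStep g st v

def Rrel (a b : Option Int × Int) : Prop :=
  a = b ∨ ((a = (none, -1) ∨ a.2 = 0) ∧ b.2 = 0)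

def Pst (a : Option Int × Int) : Prop := a = (none, -1) ∨ 0 ≤ a.2

theorem pvScanB_eq (counts : PySem.Dict Int Int) (ks : List Int) (g : Int → Int)
    (hnd : counts.keys.Nodup) (hk : counts.keys = ks)
    (hv : ∀ k ∈ ks, counts.getD k 0 = g k) :
    pvScanB counts = ks.foldl (pvStep g) (none, -1) := by
  unfold pvScanB
  rw [PySem.Dict.items_eq_map_keys counts hnd 0, hk]
  have hmap : ks.map (fun k => (k, counts.getD k 0)) = ks.map (fun k => (k, g k)) :=
    List.map_congr_left (fun k hkm => by rw [hv k hkm])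
  rw [hmap, List.foldl_map]
  rfl

theorem step_rel (g : Int → Int) (dom : PySem.Set Int) (k : Int) (a b : Option Int × Int)
    (hgk : 0 ≤ g k) (hdk : k ∈ dom → g k = 0)
    (hR : Rrel a b) (hPa : Pst a) (hPb : Pst b) :
    Rrel (pvStepA dom g a k) (pvStep g b k) ∧ Pst (pvStepA dom g a k) ∧ Pst (pvStep g b k) := by
  have hPb' : Pst (pvStep g b k) := by
    unfold pvStep
    split_ifs with h
    · exact Or.inr hgk
    · exact hPb
  have hPa' : Pst (pvStepA dom g a k) := by
    unfold pvStepA pvStep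
    split_ifs with h1 h2
    · exact hPa
    · exact Or.inr hgk
    · exact hPa
  refine ⟨?_, hPa', hPb'⟩
  rcases hR with rfl | ⟨ha, hb⟩
  · by_cases hc : PySem.Set.contains dom k
    · have hg0 : g k = 0 := hdk ((PySem.Set.contains_iff _ _).1 hc)
      have hA : pvStepA dom g a k = a := by unfold pvStepA; rw [if_pos hc]
      rw [hA]
      rcases hPa with rfl | hge
      · have hB : pvStep g ((none : Option Int), (-1 : Int)) k = (some k, g k) := by
          unfold pvStep; rw [if_pos (by simp [hg0])]
        rw [hB]
        exact Or.inr ⟨Or.inl rfl, by simpa using hg0⟩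
      · have hB : pvStep g a k = a := by unfold pvStep; rw [if_neg (by omega)]
        rw [hB]
        exact Or.inl rfl
    · have hA : pvStepA dom g a k = pvStep g a k := by unfold pvStepA; rw [if_neg hc]
      rw [hA]
      exact Or.inl rfl
  · by_cases hc : PySem.Set.contains dom k
    · have hg0 : g k = 0 := hdk ((PySem.Set.contains_iff _ _).1 hc)
      have hA : pvStepA dom g a k = a := by unfold pvStepA; rw [if_pos hc]
      have hB : pvStep g b k = b := by unfold pvStep; rw [if_neg (by omega)]
      rw [hA, hB]
      exact Or.inr ⟨ha, hb⟩
    · have hA : pvStepA dom g a k = pvStep g a k := by unfold pvStepA; rw [if_neg hc]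
      rw [hA]
      by_cases hpos : 0 < g k
      · have ha2 : a.2 ≤ 0 := by
          rcases ha with rfl | h0
          · norm_num
          · omega
        have h1 : pvStep g a k = (some k, g k) := by unfold pvStep; rw [if_pos (by omega)]
        have h2 : pvStep g b k = (some k, g k) := by unfold pvStep; rw [if_pos (by omega)]
        rw [h1, h2]
        exact Or.inl rfl
      · have hg0 : g k = 0 := by omega
        have h2 : pvStep g b k = b := by unfold pvStep; rw [if_neg (by omega)]
        rw [h2]
        rcases ha with rfl | h0
        · have h1 : pvStep g ((none : Option Int), (-1 : Int)) k = (some k, g k) := by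
            unfold pvStep; rw [if_pos (by simp [hg0])]
          rw [h1]
          exact Or.inr ⟨Or.inr (by simpa using hg0), hb⟩
        · have h1 : pvStep g a k = a := by unfold pvStep; rw [if_neg (by omega)]
          rw [h1]
          exact Or.inr ⟨Or.inr h0, hb⟩

theorem scan_rel (g : Int → Int) (dom : PySem.Set Int) (ks : List Int) :
    ∀ (a b : Option Int × Int),
      (∀ k ∈ ks, 0 ≤ g k) → (∀ k ∈ ks, k ∈ dom → g k = 0) →
      Rrel a b → Pst a → Pst b →
      Rrel (ks.foldl (pvStepA dom g) a) (ks.foldl (pvStep g) b)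
        ∧ Pst (ks.foldl (pvStepA dom g) a) ∧ Pst (ks.foldl (pvStep g) b) := by
  induction ks with
  | nil => intro a b _ _ hR hPa hPb; exact ⟨hR, hPa, hPb⟩
  | cons k t ih =>
    intro a b hg hdom hR hPa hPb
    obtain ⟨hR', hPa', hPb'⟩ :=
      step_rel g dom k a b (hg k (by simp)) (hdom k (by simp)) hR hPa hPb
    simpa using ih (pvStepA dom g a k) (pvStep g b k)
      (fun x hx => hg x (by simp [hx])) (fun x hx => hdom x (by simp [hx])) hR' hPa' hPb'

-- the covering step keeps the invariant
theorem cover_spec (d : PySem.Dict Int (List Int)) (hnd : d.keys.Nodup)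
    (unc0 : PySem.Set Int) (inv : PySem.Dict Int (List Int))
    (hI : ∀ u ∈ unc0, inv.getD u [] = invL d u) (es : List Int) :
    ∀ (unc : PySem.Set Int) (counts : PySem.Dict Int Int),
      (∀ x ∈ unc, x ∈ unc0) → counts.keys = d.keys →
      (∀ k ∈ d.keys, counts.getD k 0 = pvCountIn unc (d.getD k [])) →
      (pvCoverB inv es unc counts).1 = pvRemoveCovered unc es
        ∧ (pvCoverB inv es unc counts).2.keys = d.keys
        ∧ (∀ k ∈ d.keys,
            (pvCoverB inv es unc counts).2.getD k 0
              = pvCountIn (pvRemoveCovered unc es) (d.getD k [])) := by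
  induction es with
  | nil =>
    intro unc counts hu hk hv
    exact ⟨rfl, hk, hv⟩
  | cons u t ih =>
    intro unc counts hu hk hv
    by_cases hcu : u ∈ unc
    · have hcb : PySem.Set.contains unc u = true := (PySem.Set.contains_iff _ _).2 hcu
      have hu0 : u ∈ unc0 := hu u hcu
      have hws : inv.getD u [] = invL d u := hI u hu0
      have hstep : pvCoverB inv (u :: t) unc counts
          = pvCoverB inv t (PySem.Set.discard unc u)
              ((inv.getD u []).foldl (fun cs w => cs.modify w 0 (fun c => c - 1)) counts) := by
        unfold pvCoverB
        simp only [List.foldl_cons, hcb, if_true]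
      have hrem : pvRemoveCovered unc (u :: t) = pvRemoveCovered (PySem.Set.discard unc u) t := by
        unfold pvRemoveCovered
        simp only [List.foldl_cons, hcb, if_true]
      rw [hstep, hrem]
      apply ih
      · intro x hx
        exact hu x ((PySem.Set.mem_discard _ _ _).1 hx).1
      · rw [dec_keys]
        · exact hk
        · intro w hw
          rw [hk]
          exact mem_invL d u w (hws ▸ hw)
      · intro k hkk
        rw [dec_getD, hws, count_invL d hnd u k hkk, hv k hkk,
          pvCountIn_discard unc u hcu (d.getD k [])]
    · have hcb : PySem.Set.contains unc u = false := by
        rw [← Bool.not_eq_true, PySem.Set.contains_iff]; exact hcu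
      have hstep : pvCoverB inv (u :: t) unc counts = pvCoverB inv t unc counts := by
        unfold pvCoverB
        simp only [List.foldl_cons, hcb, Bool.false_eq_true, if_false]
      have hrem : pvRemoveCovered unc (u :: t) = pvRemoveCovered unc t := by
        unfold pvRemoveCovered
        simp only [List.foldl_cons, hcb, Bool.false_eq_true, if_false]
      rw [hstep, hrem]
      exact ih unc counts hu hk hv

theorem loop_eq (d : PySem.Dict Int (List Int)) (hnd : d.keys.Nodup)
    (unc0 : PySem.Set Int) (inv : PySem.Dict Int (List Int))
    (hI : ∀ u ∈ unc0, inv.getD u [] = invL d u) :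
    ∀ (fuel : Nat) (unc dom : PySem.Set Int) (counts : PySem.Dict Int Int),
      (∀ x ∈ unc, x ∈ unc0) → counts.keys = d.keys →
      (∀ k ∈ d.keys, counts.getD k 0 = pvCountIn unc (d.getD k [])) →
      (∀ v ∈ dom, pvCountIn unc (d.getD v []) = 0) →
      pvLoopA d fuel unc dom = pvLoopB d inv fuel unc dom counts := by
  intro fuel
  induction fuel with
  | zero => intro unc dom counts _ _ _ _; rfl
  | succ fuel ih =>
    intro unc dom counts hu hk hv hdom
    simp only [pvLoopA, pvLoopB]
    by_cases hemp : unc = []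
    · simp [hemp]
    · rw [if_neg hemp, if_neg hemp]
      have hndc : counts.keys.Nodup := by rw [hk]; exact hnd
      have hscanB : pvScanB counts
          = d.keys.foldl (pvStep (fun k => pvCountIn unc (d.getD k []))) (none, -1) :=
        pvScanB_eq counts d.keys _ hndc hk hv
      have hscanA : pvScanA d dom unc
          = d.keys.foldl (pvStepA dom (fun k => pvCountIn unc (d.getD k []))) (none, -1) := rfl
      obtain ⟨hR, hPa, hPb⟩ :=
        scan_rel (fun k => pvCountIn unc (d.getD k [])) dom d.keys (none, -1) (none, -1)
          (fun k _ => pvCountIn_nonneg unc (d.getD k []))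
          (fun k _ hkd => hdom k hkd)
          (Or.inl rfl) (Or.inl rfl) (Or.inl rfl)
      rw [hscanA, hscanB]
      rcases hR with heq | ⟨ha, hb⟩
      · rw [← heq]
        cases h1 : (d.keys.foldl (pvStepA dom (fun k => pvCountIn unc (d.getD k []))) (none, -1)).1 with
        | none => rfl
        | some bv =>
          by_cases hz : (d.keys.foldl (pvStepA dom (fun k => pvCountIn unc (d.getD k []))) (none, -1)).2 = 0
          · simp [hz]
          · have hz' : ((d.keys.foldl (pvStepA dom (fun k => pvCountIn unc (d.getD k []))) (none, -1)).2 == 0)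
                = false := by simpa using hz
            simp only [hz', Bool.false_eq_true, if_false]
            obtain ⟨hc1, hc2, hc3⟩ :=
              cover_spec d hnd unc0 inv hI (d.getD bv []) unc counts hu hk hv
            rw [hc1]
            apply ih
            · intro x hx
              exact hu x ((mem_pvRemoveCovered _ _ _).1 hx).1
            · exact hc2
            · exact hc3
            · intro v hvmem
              rcases (PySem.Set.mem_add _ _ _).1 hvmem with hvd | rfl
              · exact pvCountIn_zero_mono unc _ _
                  (fun x hx => ((mem_pvRemoveCovered _ _ _).1 hx).1) (hdom v hvd)
              · exact pvCountIn_removeCovered unc (d.getD v [])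
      · have hA : (match (d.keys.foldl (pvStepA dom (fun k => pvCountIn unc (d.getD k []))) (none, -1)).1 with
            | none => dom
            | some bv =>
              if (d.keys.foldl (pvStepA dom (fun k => pvCountIn unc (d.getD k []))) (none, -1)).2 == 0 then dom
              else pvLoopA d fuel (pvRemoveCovered unc (d.getD bv [])) (PySem.Set.add dom bv)) = dom := by
          rcases ha with ha' | ha'
          · rw [ha']
          · cases h1 : (d.keys.foldl (pvStepA dom (fun k => pvCountIn unc (d.getD k []))) (none, -1)).1 with
            | none => rfl
            | some bv => simp [ha']
        have hB : (match (d.keys.foldl (pvStep (fun k => pvCountIn unc (d.getD k []))) (none, -1)).1 with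
            | none => dom
            | some bv =>
              if (d.keys.foldl (pvStep (fun k => pvCountIn unc (d.getD k []))) (none, -1)).2 == 0 then dom
              else
                pvLoopB d inv fuel
                  (pvCoverB inv (d.getD bv []) unc counts).1 (PySem.Set.add dom bv)
                  (pvCoverB inv (d.getD bv []) unc counts).2) = dom := by
          cases h1 : (d.keys.foldl (pvStep (fun k => pvCountIn unc (d.getD k []))) (none, -1)).1 with
          | none => rfl
          | some bv => simp [hb]
        rw [hA, hB]

-- ===== VERDICT (by name: the statement is the Claim_ definition above) =====
theorem greedy_dominating_set_py_spec : Claim_equal_greedy_dominating_set_py := by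
  intro universe_ subsets _
  unfold Spec_greedy_dominating_set_py greedy_dominating_set_py greedy_dominating_set_py_alt
  have hnd := PySem.Dict.nodup_keys_ofList subsets
  apply loop_eq (PySem.Dict.ofList subsets) hnd (PySem.Set.ofList universe_)
    (pvInitB (PySem.Set.ofList universe_) (PySem.Dict.ofList subsets).items).2
  · -- inverted-index characterisation
    intro u hu0
    show ((PySem.Dict.ofList subsets).items.foldl
        (pvInitStep (PySem.Set.ofList universe_)) (PySem.Dict.empty, PySem.Dict.empty)).2.getD u []
      = invL (PySem.Dict.ofList subsets) u
    rw [init_snd]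
    simp [hu0, invL]
  · exact fun x hx => hx
  · -- counts keys
    show ((PySem.Dict.ofList subsets).items.foldl
        (pvInitStep (PySem.Set.ofList universe_)) (PySem.Dict.empty, PySem.Dict.empty)).1.keys
      = (PySem.Dict.ofList subsets).keys
    rw [init_keys]
    have h1 : (PySem.Dict.empty : PySem.Dict Int Int).keys = [] := rfl
    rw [h1, PySem.Set.update_nil_left, ← pvKeys_def,
      PySem.Set.ofList_eq_self_of_nodup _ hnd]
  · -- counts values
    intro k hkk
    exact init_fst (PySem.Set.ofList universe_) (PySem.Dict.ofList subsets).items _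
      (by rw [← pvKeys_def]; exact hnd) k _ (pvExists_es _ hnd hkk)
  · -- empty dominating set
    intro v hv
    simp [PySem.Set.empty] at hv
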